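-- pv_equiv track=rewrite | github.com/Parthi10/hackerrank | hackerrank_contests/w33/passes6.py | two_pal
-- ===== SOURCE A (Python) =====
-- def two_pal(a,b, k_list):
--     if a == b:
--         return True
--     for i in k_list:
--         if a in i:
--             if b in i:
--                 return True
--             else:
--                 return False
--         elif b in i:
--             if a in i:
--                 return True
--             else:
--                 return False
--     return False
-- ===== SOURCE B (Python) =====
-- def two_pal(a, b, k_list):
--     if a == b:
--         return True
--     ga = -1
--     gb = -1
--     for i, g in enumerate(k_list):
--         if ga == -1 and a in g:
--             ga = i
--         if gb == -1 and b in g: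
--             gb = i
--     return ga >= 0 and ga == gb
-- ===== Notes on version B (the rewrite author's own statement) =====
-- stated objective: alternative
-- what changed: B replaces A's interleaved early-return nested membership checks with a single enumerate pass that records the first group index containing a and the first containing b independently, then returns ga >= 0 and ga == gb.
import Mathlib
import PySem

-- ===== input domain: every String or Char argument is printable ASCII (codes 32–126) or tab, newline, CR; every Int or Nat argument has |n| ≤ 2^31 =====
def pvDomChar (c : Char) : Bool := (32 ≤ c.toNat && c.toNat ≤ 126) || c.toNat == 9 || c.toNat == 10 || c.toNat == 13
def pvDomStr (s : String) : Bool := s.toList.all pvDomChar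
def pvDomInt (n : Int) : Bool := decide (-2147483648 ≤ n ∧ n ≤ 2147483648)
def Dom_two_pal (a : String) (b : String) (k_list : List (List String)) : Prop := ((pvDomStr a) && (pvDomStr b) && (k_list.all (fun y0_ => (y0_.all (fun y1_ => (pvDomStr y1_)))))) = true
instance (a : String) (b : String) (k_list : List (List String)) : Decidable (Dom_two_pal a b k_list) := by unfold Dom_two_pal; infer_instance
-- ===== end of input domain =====

-- B replaces A's interleaved early-return nested membership checks with a single
-- enumerate pass recording the first group index containing a and b independently
-- (objective: alternative; same cost).


-- ===== PORT A =====
-- the for-loop of A with its early returns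
def twoPalLoopA (a : String) (b : String) : List (List String) → Bool
  | [] => false
  | g :: rest =>
      if a ∈ g then
        (if b ∈ g then true else false)
      else if b ∈ g then
        (if a ∈ g then true else false)
      else twoPalLoopA a b rest

def two_pal (a : String) (b : String) (k_list : List (List String)) : Bool :=
  if a = b then true else twoPalLoopA a b k_list

-- ===== PORT B =====
-- B's enumerate loop: carries the running index and the two first-match accumulators
def twoPalLoopB (a : String) (b : String) (idx ga gb : Int) : List (List String) → Int × Int
  | [] => (ga, gb)
  | g :: rest =>
      let ga' := if ga = -1 ∧ a ∈ g then idx else ga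
      let gb' := if gb = -1 ∧ b ∈ g then idx else gb
      twoPalLoopB a b (idx + 1) ga' gb' rest

def two_pal_alt (a : String) (b : String) (k_list : List (List String)) : Bool :=
  if a = b then true
  else
    let p := twoPalLoopB a b 0 (-1) (-1) k_list
    decide (0 ≤ p.1 ∧ p.1 = p.2)

-- ===== PRECONDITION & SPEC =====
def Spec_two_pal (a : String) (b : String) (k_list : List (List String)) (out : Bool) : Prop := out = two_pal_alt a b k_list
instance (a : String) (b : String) (k_list : List (List String)) (out : Bool) : Decidable (Spec_two_pal a b k_list out) := by unfold Spec_two_pal; infer_instance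

-- ===== CLAIM (what is proved, stated in full; the proofs are below) =====
def Claim_equal_two_pal : Prop := ∀ (a : String) (b : String) (k_list : List (List String)), Dom_two_pal a b k_list → Spec_two_pal a b k_list (two_pal a b k_list)

-- ===== LEMMAS AND PROOFS =====

-- once both accumulators are set, the loop only counts the index
theorem twoPalLoopB_frozen (a b : String) (kl : List (List String)) :
    ∀ (idx ga gb : Int), ga ≠ -1 → gb ≠ -1 → twoPalLoopB a b idx ga gb kl = (ga, gb) := by
  induction kl with
  | nil => intro idx ga gb _ _; rfl
  | cons g rest ih =>
      intro idx ga gb hga hgb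
      have h1 : ¬(ga = -1 ∧ a ∈ g) := fun h => hga h.1
      have h2 : ¬(gb = -1 ∧ b ∈ g) := fun h => hgb h.1
      simp only [twoPalLoopB, if_neg h1, if_neg h2]
      exact ih _ _ _ hga hgb

-- with ga already set, ga is preserved and gb ends up -1 or ≥ the current index
theorem twoPalLoopB_ga_set (a b : String) (kl : List (List String)) :
    ∀ (idx ga : Int), 0 ≤ idx → ga ≠ -1 →
      (twoPalLoopB a b idx ga (-1) kl).1 = ga ∧
      ((twoPalLoopB a b idx ga (-1) kl).2 = -1 ∨ idx ≤ (twoPalLoopB a b idx ga (-1) kl).2) := by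
  induction kl with
  | nil => intro idx ga _ _; exact ⟨rfl, Or.inl rfl⟩
  | cons g rest ih =>
      intro idx ga hidx hga
      have h1 : ¬(ga = -1 ∧ a ∈ g) := fun h => hga h.1
      by_cases hb : b ∈ g
      · simp only [twoPalLoopB, if_neg h1, true_and, if_pos hb]
        rw [twoPalLoopB_frozen a b rest (idx+1) ga idx hga (by omega)]
        exact ⟨rfl, Or.inr le_rfl⟩
      · simp only [twoPalLoopB, if_neg h1, true_and, if_neg hb]
        rcases ih (idx + 1) ga (by omega) hga with ⟨p1, p2⟩
        exact ⟨p1, p2.imp id (by omega)⟩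

-- with gb already set, gb is preserved and ga ends up -1 or ≥ the current index
theorem twoPalLoopB_gb_set (a b : String) (kl : List (List String)) :
    ∀ (idx gb : Int), 0 ≤ idx → gb ≠ -1 →
      (twoPalLoopB a b idx (-1) gb kl).2 = gb ∧
      ((twoPalLoopB a b idx (-1) gb kl).1 = -1 ∨ idx ≤ (twoPalLoopB a b idx (-1) gb kl).1) := by
  induction kl with
  | nil => intro idx gb _ _; exact ⟨rfl, Or.inl rfl⟩
  | cons g rest ih =>
      intro idx gb hidx hgb
      have h2 : ¬(gb = -1 ∧ b ∈ g) := fun h => hgb h.1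
      by_cases ha : a ∈ g
      · simp only [twoPalLoopB, if_neg h2, true_and, if_pos ha]
        rw [twoPalLoopB_frozen a b rest (idx+1) idx gb (by omega) hgb]
        exact ⟨rfl, Or.inr le_rfl⟩
      · simp only [twoPalLoopB, if_neg h2, true_and, if_neg ha]
        rcases ih (idx + 1) gb (by omega) hgb with ⟨p1, p2⟩
        exact ⟨p1, p2.imp id (by omega)⟩

theorem twoPal_main (a b : String) (kl : List (List String)) :
    ∀ (idx : Int), 0 ≤ idx →
      twoPalLoopA a b kl =
        (let p := twoPalLoopB a b idx (-1) (-1) kl; decide (0 ≤ p.1 ∧ p.1 = p.2)) := by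
  induction kl with
  | nil => intro idx _; norm_num [twoPalLoopA, twoPalLoopB]
  | cons g rest ih =>
      intro idx hidx
      by_cases ha : a ∈ g <;> by_cases hb : b ∈ g
      · simp only [twoPalLoopA, twoPalLoopB, if_pos ha, if_pos hb, true_and]
        rw [twoPalLoopB_frozen a b rest (idx+1) idx idx (by omega) (by omega)]
        simp [hidx]
      · simp only [twoPalLoopA, twoPalLoopB, if_pos ha, if_neg hb, true_and]
        rcases twoPalLoopB_ga_set a b rest (idx+1) idx (by omega) (by omega) with ⟨p1, p2⟩
        rw [eq_comm]
        simp only [decide_eq_false_iff_not]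
        rintro ⟨q1, q2⟩
        rw [p1] at q1 q2
        rcases p2 with p2 | p2 <;> omega
      · simp only [twoPalLoopA, twoPalLoopB, if_neg ha, if_pos hb, true_and]
        rcases twoPalLoopB_gb_set a b rest (idx+1) idx (by omega) (by omega) with ⟨p1, p2⟩
        rw [eq_comm]
        simp only [decide_eq_false_iff_not]
        rintro ⟨q1, q2⟩
        rw [p1] at q2
        rcases p2 with p2 | p2 <;> omega
      · simp only [twoPalLoopA, twoPalLoopB, if_neg ha, if_neg hb, true_and]
        exact ih (idx + 1) (by omega)

-- ===== VERDICT (by name: the statement is the Claim_ definition above) =====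
theorem two_pal_spec : Claim_equal_two_pal := by
  intro a b kl _
  unfold Spec_two_pal two_pal two_pal_alt
  by_cases hab : a = b
  · simp [hab]
  · simp only [if_neg hab]
    exact twoPal_main a b kl 0 le_rfl
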